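-- pv_equiv track=rewrite | github.com/PalmSens/MethodSCRIPT_Examples | MethodSCRIPTExample_Python/MethodSCRIPTExample_Python/palmsens/mscript.py | is_valid_start_of_loop
-- ===== SOURCE A (Python) =====
-- import string
--
-- def is_valid_start_of_loop(line: str) -> bool:
--     """If the given line is a valid start of an MScript loop (MXXXX, CXXXX, or L)"""
--     match line[0]:
--         case "M" | "C":
--             return len(line) == 5 and all(c in string.hexdigits for c in line[1:])
--         case "L":
--             return len(line) == 1
--         case _:
--             return False
-- ===== SOURCE B (Python) =====
-- import re
--
-- _LOOP_RE = re.compile(r'[MC][0-9a-fA-F]{4}|L')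
--
-- def is_valid_start_of_loop(line: str) -> bool:
--     """If the given line is a valid start of an MScript loop (MXXXX, CXXXX, or L)"""
--     return _LOOP_RE.fullmatch(line) is not None
-- ===== Notes on version B (the rewrite author's own statement) =====
-- stated objective: idiomatic
-- what changed: Replaces the per-branch match on line[0] with length checks and a hexdigit scan by a single precompiled regex fullmatch r'[MC][0-9a-fA-F]{4}|L'.
-- outside the precondition, e.g. on is_valid_start_of_loop(''): A raises IndexError, B returns False
import Mathlib
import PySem

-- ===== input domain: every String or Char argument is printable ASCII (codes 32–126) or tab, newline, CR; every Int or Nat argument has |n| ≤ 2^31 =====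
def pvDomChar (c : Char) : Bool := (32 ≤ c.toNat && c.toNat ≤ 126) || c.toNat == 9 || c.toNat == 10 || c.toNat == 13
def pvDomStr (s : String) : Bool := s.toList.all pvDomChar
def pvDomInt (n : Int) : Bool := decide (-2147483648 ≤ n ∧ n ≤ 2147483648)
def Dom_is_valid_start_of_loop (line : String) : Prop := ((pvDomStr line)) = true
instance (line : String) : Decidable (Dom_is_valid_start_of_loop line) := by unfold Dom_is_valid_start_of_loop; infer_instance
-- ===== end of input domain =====

-- B replaces A's per-branch first-character match with length/hexdigit checks by a single
-- precompiled regex fullmatch r'[MC][0-9a-fA-F]{4}|L' (more idiomatic); on the empty string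
-- A raises IndexError while B returns false; Pre_ excludes exactly that input.


-- ===== PORT A =====
-- string.hexdigits as a character list
def pyHexdigits : List Char :=
  ['0','1','2','3','4','5','6','7','8','9','a','b','c','d','e','f','A','B','C','D','E','F']

def is_valid_start_of_loop (line : String) : Bool :=
  match PySem.Str.pyGet? line 0 with
  | none => false   -- line[0] raises IndexError in Python on the empty string; excluded by Pre_
  | some c =>
    if c = 'M' || c = 'C' then
      decide (PySem.Str.len line = 5) &&
        (PySem.List.slice line.toList (some 1) none).all (fun ch => pyHexdigits.contains ch)
    else if c = 'L' then
      decide (PySem.Str.len line = 1)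
    else
      false

-- ===== PORT B =====
-- the regex character class [0-9a-fA-F]
def reHexClass (c : Char) : Bool :=
  ('0' ≤ c && c ≤ '9') || ('a' ≤ c && c ≤ 'f') || ('A' ≤ c && c ≤ 'F')

-- fullmatch of r'[MC][0-9a-fA-F]{4}|L': the first alternative matches exactly the
-- 5-character shape [MC] + 4 hex-class characters, the second a single 'L'.
def is_valid_start_of_loop_alt (line : String) : Bool :=
  match line.toList with
  | [c, h1, h2, h3, h4] =>
      (c = 'M' || c = 'C') && reHexClass h1 && reHexClass h2 && reHexClass h3 && reHexClass h4
  | [c] => c = 'L'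
  | _ => false

-- ===== PRECONDITION & SPEC =====
-- Pre_ excludes exactly the empty string, on which A raises IndexError (line[0]).
def Pre_is_valid_start_of_loop (line : String) : Prop := line ≠ ""
instance (line : String) : Decidable (Pre_is_valid_start_of_loop line) := by
  unfold Pre_is_valid_start_of_loop; infer_instance

def pvWitness_is_valid_start_of_loop : String := "L"

def Spec_is_valid_start_of_loop (line : String) (out : Bool) : Prop := out = is_valid_start_of_loop_alt line
instance (line : String) (out : Bool) : Decidable (Spec_is_valid_start_of_loop line out) := by
  unfold Spec_is_valid_start_of_loop; infer_instance

-- ===== CLAIM (what is proved, stated in full; the proofs are below) =====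
def Claim_equal_is_valid_start_of_loop : Prop := ∀ (line : String), Dom_is_valid_start_of_loop line → Pre_is_valid_start_of_loop line → Spec_is_valid_start_of_loop line (is_valid_start_of_loop line)

-- ===== LEMMAS AND PROOFS =====

lemma char_le_toNat (c d : Char) : (c ≤ d) ↔ c.toNat ≤ d.toNat := by
  rw [Char.le_def]; exact ⟨fun h => h, fun h => h⟩

lemma char_eq_toNat (c d : Char) : (c = d) ↔ c.toNat = d.toNat := by
  constructor
  · rintro rfl; rfl
  · intro h
    have h1 := Char.ofNat_toNat c
    have h2 := Char.ofNat_toNat d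
    rw [← h1, ← h2, h]

-- membership in string.hexdigits coincides with the regex class [0-9a-fA-F]
lemma hex_mem (c : Char) : pyHexdigits.contains c = reHexClass c := by
  rw [Bool.eq_iff_iff, List.contains_iff_mem]
  simp only [pyHexdigits, reHexClass, List.mem_cons, List.not_mem_nil, or_false,
    Bool.or_eq_true, Bool.and_eq_true, decide_eq_true_eq, char_le_toNat, char_eq_toNat]
  have : ('0').toNat = 48 := rfl
  have : ('1').toNat = 49 := rfl
  have : ('2').toNat = 50 := rfl
  have : ('3').toNat = 51 := rfl
  have : ('4').toNat = 52 := rfl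
  have : ('5').toNat = 53 := rfl
  have : ('6').toNat = 54 := rfl
  have : ('7').toNat = 55 := rfl
  have : ('8').toNat = 56 := rfl
  have : ('9').toNat = 57 := rfl
  have : ('a').toNat = 97 := rfl
  have : ('b').toNat = 98 := rfl
  have : ('c').toNat = 99 := rfl
  have : ('d').toNat = 100 := rfl
  have : ('e').toNat = 101 := rfl
  have : ('f').toNat = 102 := rfl
  have : ('A').toNat = 65 := rfl
  have : ('B').toNat = 66 := rfl
  have : ('C').toNat = 67 := rfl
  have : ('D').toNat = 68 := rfl
  have : ('E').toNat = 69 := rfl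
  have : ('F').toNat = 70 := rfl
  omega

lemma hex_mem' (c : Char) : decide (c ∈ pyHexdigits) = reHexClass c := by
  rw [← hex_mem, Bool.eq_iff_iff, decide_eq_true_iff]
  exact (List.contains_iff_mem).symm

-- ===== VERDICT (by name: the statement is the Claim_ definition above) =====
theorem is_valid_start_of_loop_spec : Claim_equal_is_valid_start_of_loop := by
  intro line _ hpre
  unfold Spec_is_valid_start_of_loop is_valid_start_of_loop is_valid_start_of_loop_alt
  have hl : line.toList ≠ [] := fun h => hpre (by rwa [← String.toList_eq_nil_iff])
  rw [show ((0:Int) = ((0:Nat):Int)) from rfl, PySem.Str.pyGet?_natCast, PySem.Str.len_eq,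
    PySem.List.slice_from_one]
  rcases h : line.toList with _ | ⟨c, _ | ⟨a, _ | ⟨b, _ | ⟨d, _ | ⟨e, _ | ⟨f, rest⟩⟩⟩⟩⟩⟩
  · exact absurd h hl
  · simp
    rintro rfl
    exact ⟨by decide, by decide⟩
  · simp
  · simp
  · simp
  · simp [hex_mem', Bool.and_assoc]
  · simp
    split_ifs <;> intros <;> omega
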